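-- pv_equiv track=rewrite | github.com/tejadev23/DOTBot | scripts/extract_metadata.py | parse_standard_info
-- ===== SOURCE A (Python) =====
-- def parse_standard_info(text):
--     lines = text.splitlines()
--     capture = False
--     description_lines = []
--
--     # Start capture if one of these is found
--     start_keywords = ["CONSTRUCTION DETAIL", "CONSTRUCTION DETAILS", "STANDARD"]
--     # Stop capture if one of these is found
--     stop_keywords = ["REVISION", "NO SCALE", "NUMBER", "BY", "NOVEMBER", "DATE", "DRAWN", "CHECKED", "TRACED"]
--
--     for line in lines:
--         upper_line = line.strip().upper()
--
--         if not capture: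
--             if any(start_key in upper_line for start_key in start_keywords):
--                 capture = True
--                 continue
--         else:
--             if any(stop_key in upper_line for stop_key in stop_keywords):
--                 break
--             if upper_line.strip() == "":
--                 continue
--             description_lines.append(line.strip())
--
--     description = "\n".join(description_lines).strip()
--     return description if description else "No description found"
-- ===== SOURCE B (Python) =====
-- def parse_standard_info(text):
--     start_keywords = ["CONSTRUCTION DETAIL", "CONSTRUCTION DETAILS", "STANDARD"]
--     stop_keywords = ["REVISION", "NO SCALE", "NUMBER", "BY", "NOVEMBER", "DATE", "DRAWN", "CHECKED", "TRACED"]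
--
--     # Tables: stripped lines and their uppercased forms, computed once.
--     lines = [l.strip() for l in text.splitlines()]
--     ups = [l.upper() for l in lines]
--
--     # Index arithmetic instead of a stateful scan: list of start-hit indices.
--     starts = [i for i, u in enumerate(ups) if any(k in u for k in start_keywords)]
--     if not starts:
--         return "No description found"
--     i = starts[0]
--
--     # First stop-hit index after i (or end of text).
--     stops = [j for j, u in enumerate(ups) if j > i and any(k in u for k in stop_keywords)]
--     j = stops[0] if stops else len(lines)
--
--     # The description is the non-blank stripped lines in the slice between them.
--     description = "\n".join([l for l in lines[i + 1:j] if l]).strip()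
--     return description if description else "No description found"
-- ===== Notes on version B (the rewrite author's own statement) =====
-- stated objective: alternative
-- what changed: Replaces A's stateful flag-threaded streaming loop (capture flag, continue/break) with an index-arithmetic formulation: precomputed stripped/uppercased line tables, start and stop indices obtained by comprehensions over enumerate, then a slice lines[i+1:j] filtered for non-blank lines.
import Mathlib
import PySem

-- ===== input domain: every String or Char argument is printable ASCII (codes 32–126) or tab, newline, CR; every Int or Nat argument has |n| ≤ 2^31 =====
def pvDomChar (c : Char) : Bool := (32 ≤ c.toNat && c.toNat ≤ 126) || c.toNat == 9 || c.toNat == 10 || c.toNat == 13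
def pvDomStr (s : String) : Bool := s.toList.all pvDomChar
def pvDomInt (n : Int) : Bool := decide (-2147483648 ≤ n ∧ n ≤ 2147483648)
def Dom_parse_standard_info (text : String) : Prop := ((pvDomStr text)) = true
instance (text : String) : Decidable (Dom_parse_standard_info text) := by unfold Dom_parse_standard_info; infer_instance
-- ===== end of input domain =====

-- B replaces A's flag-threaded streaming loop with precomputed line tables plus index
-- arithmetic (start/stop indices via enumerate comprehensions, then a slice); same O(n) cost.

-- shared literal keyword lists and the `any(k in u for k in keys)` test (verbatim in both Pythons)
def pvStartKeys : List String := ["CONSTRUCTION DETAIL", "CONSTRUCTION DETAILS", "STANDARD"]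
def pvStopKeys : List String := ["REVISION", "NO SCALE", "NUMBER", "BY", "NOVEMBER", "DATE", "DRAWN", "CHECKED", "TRACED"]
def pvHit (keys : List String) (u : String) : Bool := keys.any (fun k => PySem.Str.isIn k u)

-- ===== PORT A =====
-- A's single loop over lines, threading the capture flag and the accumulator.
def pvLoopA : List String → Bool → List String → List String
  | [], _, acc => acc
  | line :: rest, capture, acc =>
    let upper_line := PySem.Str.upper (PySem.Str.strip line)
    if capture = false then
      if pvHit pvStartKeys upper_line then pvLoopA rest true acc
      else pvLoopA rest false acc
    else
      if pvHit pvStopKeys upper_line then acc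
      else if PySem.Str.strip upper_line == "" then pvLoopA rest capture acc
      else pvLoopA rest capture (acc ++ [PySem.Str.strip line])

def parse_standard_info (text : String) : String :=
  let description := PySem.Str.strip (PySem.Str.join "\n" (pvLoopA (PySem.Str.splitlines text) false []))
  if description == "" then "No description found" else description

-- ===== PORT B =====
def parse_standard_info_alt (text : String) : String :=
  let lines := (PySem.Str.splitlines text).map PySem.Str.strip
  let ups := lines.map PySem.Str.upper
  let starts := ((PySem.List.enumerate ups 0).filter (fun p => pvHit pvStartKeys p.2)).map (·.1)
  match starts with
  | [] => "No description found"
  | i :: _ =>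
    let stops := ((PySem.List.enumerate ups 0).filter (fun p => decide (i < p.1) && pvHit pvStopKeys p.2)).map (·.1)
    let j : Int := match stops with | [] => (lines.length : Int) | s :: _ => s
    let body := (PySem.List.slice lines (some (i + 1)) (some j)).filter (fun l => !(l == ""))
    let description := PySem.Str.strip (PySem.Str.join "\n" body)
    if description == "" then "No description found" else description

-- ===== PRECONDITION & SPEC =====
def Spec_parse_standard_info (text : String) (out : String) : Prop := out = parse_standard_info_alt text
instance (text : String) (out : String) : Decidable (Spec_parse_standard_info text out) := by unfold Spec_parse_standard_info; infer_instance

-- ===== CLAIM (what is proved, stated in full; the proofs are below) =====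
def Claim_equal_parse_standard_info : Prop := ∀ (text : String), Dom_parse_standard_info text → Spec_parse_standard_info text (parse_standard_info text)

-- ===== LEMMAS AND PROOFS =====

-- the per-line tests, abbreviated
def pvHitStart (l : String) : Bool := pvHit pvStartKeys (PySem.Str.upper (PySem.Str.strip l))
def pvHitStop (l : String) : Bool := pvHit pvStopKeys (PySem.Str.upper (PySem.Str.strip l))

-- A's capture-phase loop, isolated (proof helper)
def pvCollect : List String → List String
  | [] => []
  | line :: rest =>
    if pvHitStop line then []
    else if PySem.Str.strip (PySem.Str.upper (PySem.Str.strip line)) == "" then pvCollect rest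
    else PySem.Str.strip line :: pvCollect rest

theorem pv_isspace_upperChar (c : Char) :
    PySem.Chars.isspace (PySem.Chars.upperChar c) = PySem.Chars.isspace c := by
  unfold PySem.Chars.upperChar
  by_cases h : PySem.Chars.islower c = true
  · have hc : 97 ≤ c.toNat ∧ c.toNat ≤ 122 := by
      unfold PySem.Chars.islower at h
      simp only [Bool.and_eq_true, decide_eq_true_eq, Char.le_def] at h
      exact ⟨h.1, h.2⟩
    have hv : (c.toNat - 32).isValidChar := Or.inl (by omega)
    have ht : (Char.ofNat (c.toNat - 32)).toNat = c.toNat - 32 := by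
      simp only [Char.ofNat, dif_pos hv]
      simp only [Char.ofNatAux, Char.toNat]
      simp
    simp only [h, if_true]
    have h1 := hc.1; have h2 := hc.2
    rw [Bool.eq_iff_iff]
    simp only [PySem.Chars.isspace, ht, Bool.or_eq_true, Bool.and_eq_true, decide_eq_true_eq]
    omega
  · simp [h]

theorem pv_strip_nil_iff (cs : List Char) :
    PySem.Chars.strip cs = [] ↔ ∀ c ∈ cs, PySem.Chars.isspace c = true := by
  unfold PySem.Chars.strip PySem.Chars.rstrip PySem.Chars.lstrip
  constructor
  · intro h c hc
    have h' : ∀ x ∈ (List.dropWhile PySem.Chars.isspace cs).reverse, PySem.Chars.isspace x = true := by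
      rw [List.reverse_eq_nil_iff] at h
      rw [List.dropWhile_eq_nil_iff] at h
      intro x hx; exact h x hx
    have h'' : ∀ x ∈ List.dropWhile PySem.Chars.isspace cs, PySem.Chars.isspace x = true := by
      intro x hx; exact h' x (List.mem_reverse.mpr hx)
    have := List.takeWhile_append_dropWhile (p := PySem.Chars.isspace) (l := cs)
    rw [← this] at hc
    rcases List.mem_append.mp hc with h1 | h1
    · exact List.mem_takeWhile_imp h1
    · exact h'' c h1
  · intro h
    have h1 : List.dropWhile PySem.Chars.isspace cs = [] :=
      List.dropWhile_eq_nil_iff.mpr h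
    simp [h1]

theorem pv_strip_all_isspace (cs : List Char)
    (h : ∀ c ∈ PySem.Chars.strip cs, PySem.Chars.isspace c = true) :
    ∀ c ∈ cs, PySem.Chars.isspace c = true := by
  intro c hc
  have hsplit := List.takeWhile_append_dropWhile (p := PySem.Chars.isspace) (l := cs)
  rw [← hsplit] at hc
  rcases List.mem_append.mp hc with h1 | h1
  · exact List.mem_takeWhile_imp h1
  · set t := List.dropWhile PySem.Chars.isspace cs with ht
    have h2 : c ∈ t.reverse := List.mem_reverse.mpr h1
    have hsplit2 := List.takeWhile_append_dropWhile (p := PySem.Chars.isspace) (l := t.reverse)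
    rw [← hsplit2] at h2
    rcases List.mem_append.mp h2 with h3 | h3
    · exact List.mem_takeWhile_imp h3
    · apply h
      unfold PySem.Chars.strip PySem.Chars.rstrip PySem.Chars.lstrip
      rw [← ht]
      exact List.mem_reverse.mpr h3

theorem pv_mem_of_mem_strip {a : Char} {cs : List Char} (h : a ∈ PySem.Chars.strip cs) : a ∈ cs := by
  unfold PySem.Chars.strip PySem.Chars.rstrip PySem.Chars.lstrip at h
  have h1 := List.mem_reverse.mp h
  have h2 := (List.dropWhile_sublist _).subset h1
  have h3 := List.mem_reverse.mp h2
  exact (List.dropWhile_sublist _).subset h3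

theorem pv_blank_eq (l : String) :
    (PySem.Str.strip (PySem.Str.upper (PySem.Str.strip l)) == "") = (PySem.Str.strip l == "") := by
  have hnil : ∀ cs : List Char, (String.ofList cs = "") ↔ cs = [] := by
    intro cs
    constructor
    · intro h; have := congrArg String.toList h; simpa using this
    · intro h; simp [h]
  rw [Bool.eq_iff_iff]
  simp only [PySem.Str.strip, PySem.Str.upper, beq_iff_eq, String.toList_ofList]
  rw [hnil, hnil, pv_strip_nil_iff, pv_strip_nil_iff]
  unfold PySem.Chars.upper
  constructor
  · intro h
    have h1 : ∀ c ∈ PySem.Chars.strip l.toList, PySem.Chars.isspace c = true := by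
      intro c hc
      have := h (PySem.Chars.upperChar c) (List.mem_map.mpr ⟨c, hc, rfl⟩)
      rwa [pv_isspace_upperChar] at this
    exact pv_strip_all_isspace _ h1
  · intro h c hc
    rcases List.mem_map.mp hc with ⟨a, ha, rfl⟩
    rw [pv_isspace_upperChar]
    exact h a (pv_mem_of_mem_strip ha)

-- A's loop with the flag set collects exactly pvCollect
theorem pv_loopA_capture (lines : List String) :
    ∀ acc, pvLoopA lines true acc = acc ++ pvCollect lines := by
  induction lines with
  | nil => intro acc; simp [pvLoopA, pvCollect]
  | cons line rest ih =>
    intro acc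
    by_cases hstop : pvHit pvStopKeys (PySem.Str.upper (PySem.Str.strip line)) = true
    · simp [pvLoopA, pvCollect, pvHitStop, hstop]
    · by_cases hblank : PySem.Str.strip (PySem.Str.upper (PySem.Str.strip line)) == ""
      · simp only [pvLoopA, pvCollect, pvHitStop]
        simp [hstop, hblank, ih]
      · simp only [pvLoopA, pvCollect, pvHitStop]
        simp [hstop, hblank, ih]

-- A's loop with the flag clear: locate the first start-hit line, then capture after it
theorem pv_loopA_search (lines : List String) :
    ∀ acc, pvLoopA lines false acc =
      match lines.findIdx? pvHitStart with
      | none => acc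
      | some k => pvLoopA (lines.drop (k + 1)) true acc := by
  induction lines with
  | nil => intro acc; simp [pvLoopA]
  | cons line rest ih =>
    intro acc
    rw [List.findIdx?_cons]
    by_cases hstart : pvHitStart line = true
    · simp only [pvLoopA, pvHitStart] at *
      simp [hstart]
    · simp only [pvLoopA, pvHitStart] at *
      simp only [Bool.not_eq_true] at hstart
      simp only [hstart, if_false, Bool.false_eq_true]
      rw [ih]
      cases h : rest.findIdx? pvHitStart <;> simp

-- head of the index comprehension = findIdx?, with the enumerate offset
theorem pv_starts_head (q : String → Bool) (U : List String) (s : Int) :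
    ((((PySem.List.enumerate U s).filter (fun p => q p.2)).map (·.1)).head?) =
      (U.findIdx? q).map (fun k => s + (k : Int)) := by
  induction U generalizing s with
  | nil => simp [PySem.List.enumerate_nil]
  | cons x xs ih =>
    rw [PySem.List.enumerate_cons, List.findIdx?_cons]
    by_cases hq : q x = true
    · simp [hq]
    · simp only [Bool.not_eq_true] at hq
      simp only [List.filter_cons, hq, Bool.false_eq_true, if_false, ih]
      cases h : xs.findIdx? q with
      | none => simp
      | some k =>
        simp
        ring

-- pvCollect is take-to-first-stop, map strip, drop blanks
theorem pv_collect_eq (T : List String) :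
    pvCollect T =
      ((T.take (match T.findIdx? pvHitStop with | none => T.length | some m => m)).map
        PySem.Str.strip).filter (fun l => !(l == "")) := by
  induction T with
  | nil => simp [pvCollect]
  | cons line rest ih =>
    rw [List.findIdx?_cons]
    by_cases hstop : pvHitStop line = true
    · simp [pvCollect, hstop]
    · simp only [Bool.not_eq_true] at hstop
      simp only [pvCollect, hstop, Bool.false_eq_true, if_false]
      have hmatch :
          (match (rest.findIdx? pvHitStop).map (· + 1) with
            | none => (line :: rest).length | some m => m)
          = (match rest.findIdx? pvHitStop with
            | none => rest.length | some m => m) + 1 := by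
        cases h : rest.findIdx? pvHitStop <;> simp
      rw [hmatch, List.take_succ_cons, List.map_cons, List.filter_cons]
      by_cases hblank : PySem.Str.strip (PySem.Str.upper (PySem.Str.strip line)) == ""
      · have hb : (PySem.Str.strip line == "") = true := by rw [← pv_blank_eq]; exact hblank
        simp only [hblank, if_true, ih]
        simp [hb]
      · have hb : (PySem.Str.strip line == "") = false := by
          rw [← pv_blank_eq]; simpa using hblank
        simp only [hblank, ih]
        simp [hb]

-- the "indices greater than k" comprehension is the plain comprehension over the suffix
theorem pv_stops_head (q : String → Bool) (U : List String) (k : Nat) (hk : k + 1 ≤ U.length) :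
    ((((PySem.List.enumerate U 0).filter (fun p => decide ((k : Int) < p.1) && q p.2)).map (·.1)).head?)
      = ((U.drop (k + 1)).findIdx? q).map (fun m => ((k : Int) + 1) + (m : Int)) := by
  conv_lhs => rw [← List.take_append_drop (k + 1) U]
  rw [PySem.List.enumerate_append, List.filter_append, List.map_append]
  have hlen : (U.take (k + 1)).length = k + 1 := by
    rw [List.length_take]; omega
  have h1 : (PySem.List.enumerate (U.take (k + 1)) 0).filter
      (fun p => decide ((k : Int) < p.1) && q p.2) = [] := by
    apply List.filter_eq_nil_iff.mpr
    intro p hp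
    rcases (PySem.List.mem_enumerate_iff _ _ _).mp hp with ⟨j, hj, rfl⟩
    rw [hlen] at hj
    simp only [Bool.and_eq_true, decide_eq_true_eq, not_and]
    intro hlt
    exfalso
    omega
  rw [h1, List.map_nil, List.nil_append, hlen]
  have h2 : (PySem.List.enumerate (U.drop (k + 1)) (0 + ((k + 1 : Nat) : Int))).filter
        (fun p => decide ((k : Int) < p.1) && q p.2)
      = (PySem.List.enumerate (U.drop (k + 1)) (0 + ((k + 1 : Nat) : Int))).filter (fun p => q p.2) := by
    apply List.filter_congr
    intro p hp
    rcases (PySem.List.mem_enumerate_iff _ _ _).mp hp with ⟨j, hj, hpj⟩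
    subst hpj
    have hlt : (k : Int) < 0 + ((k + 1 : Nat) : Int) + (j : Int) := by push_cast; omega
    simp
    intro _
    omega
  rw [h2, pv_starts_head]
  cases h : (U.drop (k + 1)).findIdx? q <;> simp

-- ===== VERDICT (by name: the statement is the Claim_ definition above) =====
theorem parse_standard_info_spec : Claim_equal_parse_standard_info := by
  intro text _
  unfold Spec_parse_standard_info parse_standard_info parse_standard_info_alt
  rw [pv_loopA_search]
  set L := PySem.Str.splitlines text with hLdef
  clear_value L
  clear hLdef
  have hUmap : (L.map PySem.Str.strip).map PySem.Str.upper
      = L.map (fun l => PySem.Str.upper (PySem.Str.strip l)) := by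
    rw [List.map_map]; rfl
  have hfindStart : ((L.map PySem.Str.strip).map PySem.Str.upper).findIdx? (fun u => pvHit pvStartKeys u)
      = L.findIdx? pvHitStart := by
    rw [hUmap, List.findIdx?_map]
    have hpred : ((fun u => pvHit pvStartKeys u) ∘ fun l => PySem.Str.upper (PySem.Str.strip l))
        = pvHitStart := by funext l; simp only [Function.comp_apply, pvHitStart]
    rw [hpred]
  cases hF : List.findIdx? pvHitStart L with
  | none =>
    have hsh := pv_starts_head (pvHit pvStartKeys) ((L.map PySem.Str.strip).map PySem.Str.upper) 0
    rw [hfindStart, hF] at hsh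
    have hnil := List.head?_eq_none_iff.mp (hsh.trans (by simp))
    simp only [hnil]
    decide
  | some k =>
    have hsh := pv_starts_head (pvHit pvStartKeys) ((L.map PySem.Str.strip).map PySem.Str.upper) 0
    rw [hfindStart, hF] at hsh
    have hsh' : (((PySem.List.enumerate ((L.map PySem.Str.strip).map PySem.Str.upper) 0).filter
        (fun p => pvHit pvStartKeys p.2)).map (·.1)).head? = some ((k : Nat) : Int) :=
      hsh.trans (by simp)
    obtain ⟨tl, htl⟩ := List.head?_eq_some_iff.mp hsh'
    simp only [htl]
    rw [pv_loopA_capture, List.nil_append, pv_collect_eq]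
    have hk1 : k + 1 ≤ ((L.map PySem.Str.strip).map PySem.Str.upper).length := by
      have := List.findIdx?_eq_some_iff_findIdx_eq.mp hF
      simp
      omega
    have hstops := pv_stops_head (pvHit pvStopKeys) ((L.map PySem.Str.strip).map PySem.Str.upper) k hk1
    have hpred2 : ((fun u => pvHit pvStopKeys u) ∘ fun l => PySem.Str.upper (PySem.Str.strip l))
        = pvHitStop := by funext l; simp only [Function.comp_apply, pvHitStop]
    have hfindStop : (((L.map PySem.Str.strip).map PySem.Str.upper).drop (k + 1)).findIdx?
        (fun u => pvHit pvStopKeys u) = (L.drop (k + 1)).findIdx? pvHitStop := by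
      rw [hUmap, ← List.map_drop, List.findIdx?_map, hpred2]
    rw [hfindStop] at hstops
    cases hT : (L.drop (k + 1)).findIdx? pvHitStop with
    | none =>
      rw [hT] at hstops
      have hstopnil := List.head?_eq_none_iff.mp (hstops.trans (by simp))
      simp only [hstopnil]
      have e : PySem.List.slice (L.map PySem.Str.strip) (some ((k : Int) + 1))
          (some ((L.map PySem.Str.strip).length : Int)) = (L.drop (k + 1)).map PySem.Str.strip := by
        rw [show ((k : Int) + 1) = ((k + 1 : Nat) : Int) from by push_cast; ring]
        rw [PySem.List.slice_natCast, ← List.map_drop]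
        apply List.take_of_length_le
        simp
      rw [List.take_length, e]
    | some m =>
      rw [hT] at hstops
      have hstops' : (((PySem.List.enumerate ((L.map PySem.Str.strip).map PySem.Str.upper) 0).filter
          (fun p => decide ((k : Int) < p.1) && pvHit pvStopKeys p.2)).map (·.1)).head?
          = some ((k : Int) + 1 + (m : Int)) := hstops.trans (by simp)
      obtain ⟨tl2, htl2⟩ := List.head?_eq_some_iff.mp hstops'
      simp only [htl2]
      have e : PySem.List.slice (L.map PySem.Str.strip) (some ((k : Int) + 1))
          (some ((k : Int) + 1 + (m : Int))) = ((L.drop (k + 1)).take m).map PySem.Str.strip := by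
        rw [show ((k : Int) + 1 + (m : Int)) = ((k + 1 + m : Nat) : Int) from by push_cast; ring]
        rw [show ((k : Int) + 1) = ((k + 1 : Nat) : Int) from by push_cast; ring]
        rw [PySem.List.slice_natCast, ← List.map_drop, ← List.map_take, Nat.add_sub_cancel_left]
      rw [e]
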